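-- pv_equiv track=rewrite | github.com/muggl3mind/acc_agent | acc_agent/sub_agents/journal_generator/tools.py | get_date_range
-- ===== SOURCE A (Python) =====
-- from typing import Dict, List, Any
--
-- def get_date_range(journal_entries: List[Dict[str, Any]]) -> str:
--     """Get the date range for journal entries."""
--     if not journal_entries:
--         return 'N/A'
--
--     dates = [entry.get('date', '') for entry in journal_entries if entry.get('date')]
--     if not dates:
--         return 'N/A'
--
--     min_date = min(dates)
--     max_date = max(dates)
--
--     if min_date == max_date:
--         return min_date
--     else:
--         return f"{min_date} to {max_date}"
-- ===== SOURCE B (Python) =====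
-- def get_date_range(journal_entries):
--     """Get the date range by sorting the present dates and taking the ends."""
--     dates = sorted(entry['date'] for entry in journal_entries if entry.get('date'))
--     if not dates:
--         return 'N/A'
--     lo, hi = dates[0], dates[-1]
--     return lo if lo == hi else f"{lo} to {hi}"
-- ===== Notes on version B (the rewrite author's own statement) =====
-- stated objective: alternative
-- what changed: Instead of computing min() and max() over the filtered dates, B sorts the filtered dates once and reads the range off the first and last element of the sorted list (also merging A's two separate 'N/A' checks into one emptiness test).
import Mathlib
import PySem

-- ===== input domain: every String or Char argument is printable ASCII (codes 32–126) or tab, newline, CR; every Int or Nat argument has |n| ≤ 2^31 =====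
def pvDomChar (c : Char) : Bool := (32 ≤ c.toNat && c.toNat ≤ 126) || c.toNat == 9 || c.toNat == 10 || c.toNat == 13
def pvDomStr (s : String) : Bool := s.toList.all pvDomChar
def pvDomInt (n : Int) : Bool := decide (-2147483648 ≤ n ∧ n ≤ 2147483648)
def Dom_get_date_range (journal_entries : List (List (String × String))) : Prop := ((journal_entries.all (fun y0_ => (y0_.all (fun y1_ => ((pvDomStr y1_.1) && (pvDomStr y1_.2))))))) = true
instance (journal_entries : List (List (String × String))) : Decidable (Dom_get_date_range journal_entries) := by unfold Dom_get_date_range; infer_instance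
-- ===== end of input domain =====

-- B replaces A's min()+max() over the filtered dates by one sort of them, reading the range off its first and last element; alternative decomposition.

-- ===== PORT A =====
-- entry.get('date') (no default): Option String
def pvGetDate (entry : List (String × String)) : Option String :=
  (PySem.Dict.ofList entry).get? "date"

def get_date_range (journal_entries : List (List (String × String))) : String :=
  if journal_entries = [] then "N/A"
  else
    let dates := (journal_entries.filter
        (fun e => match pvGetDate e with | none => false | some s => s ≠ "")).map
        (fun e => ((PySem.Dict.ofList e).getD "date" ""))
    if dates = [] then "N/A"
    else
      match PySem.List.min? dates (fun x => x), PySem.List.max? dates (fun x => x) with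
      | some min_date, some max_date =>
          if min_date = max_date then min_date else min_date ++ " to " ++ max_date
      | _, _ => "N/A"   -- unreachable: dates ≠ []

-- ===== PORT B =====
def get_date_range_alt (journal_entries : List (List (String × String))) : String :=
  let dates := PySem.List.sorted
      ((journal_entries.filter
          (fun e => match pvGetDate e with | none => false | some s => s ≠ "")).map
        (fun e => ((PySem.Dict.ofList e).getD "date" "")))
      (fun x => x) false
  match dates with
  | [] => "N/A"
  | lo :: t =>
      let hi := (lo :: t).getLast (by simp)   -- dates[-1]
      if lo = hi then lo else lo ++ " to " ++ hi

-- ===== PRECONDITION & SPEC =====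
def Spec_get_date_range (journal_entries : List (List (String × String))) (out : String) : Prop := out = get_date_range_alt journal_entries
instance (journal_entries : List (List (String × String))) (out : String) : Decidable (Spec_get_date_range journal_entries out) := by unfold Spec_get_date_range; infer_instance

-- ===== CLAIM (what is proved, stated in full; the proofs are below) =====
def Claim_equal_get_date_range : Prop := ∀ (journal_entries : List (List (String × String))), Dom_get_date_range journal_entries → Spec_get_date_range journal_entries (get_date_range journal_entries)

-- ===== LEMMAS AND PROOFS =====

-- the common filtered dates list
def pvDates (journal_entries : List (List (String × String))) : List String :=
  (journal_entries.filter
      (fun e => match pvGetDate e with | none => false | some s => s ≠ "")).map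
      (fun e => ((PySem.Dict.ofList e).getD "date" ""))

-- in a ≤-pairwise list every element is ≤ the last one
theorem pv_le_getLast (l : List String) (hne : l ≠ [])
    (hp : l.Pairwise (· ≤ ·)) : ∀ x ∈ l, x ≤ l.getLast hne := by
  induction l with
  | nil => exact absurd rfl hne
  | cons a t ih =>
    rcases List.pairwise_cons.mp hp with ⟨ha, ht⟩
    intro x hx
    by_cases htne : t = []
    · subst htne
      simp at hx
      simp [hx]
    · rw [List.getLast_cons htne]
    
      rcases List.mem_cons.mp hx with rfl | hx
      · exact ha _ (List.getLast_mem htne)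
      · exact ih htne ht x hx

-- ===== VERDICT (by name: the statement is the Claim_ definition above) =====
theorem get_date_range_spec : Claim_equal_get_date_range := by
  intro js _
  unfold Spec_get_date_range get_date_range get_date_range_alt
  show _ = (match PySem.List.sorted (pvDates js) (fun x => x) false with
    | [] => "N/A"
    | lo :: t => let hi := (lo :: t).getLast (by simp)
                 if lo = hi then lo else lo ++ " to " ++ hi)
  by_cases hjs : js = []
  · subst hjs
    simp [pvDates, PySem.List.sorted]
  · simp only [hjs, if_false]
    rcases hd : pvDates js with _ | ⟨d, t⟩
    · unfold pvDates at hd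
      rw [hd]
      simp [PySem.List.sorted]
    · have hrw : ((js.filter
          (fun e => match pvGetDate e with | none => false | some s => s ≠ "")).map
          (fun e => ((PySem.Dict.ofList e).getD "date" ""))) = d :: t := hd
      rw [hrw]
      -- A's values
      have hmin : PySem.List.min? (d :: t) (fun x => x) = some (t.foldl min d) :=
        PySem.List.min?_id_cons d t
      have hmax : PySem.List.max? (d :: t) (fun x => x) = some (t.foldl max d) :=
        PySem.List.max?_id_cons d t
      rw [hmin, hmax]
      simp only []
      -- B's sorted list is nonempty
      rcases hs : PySem.List.sorted (d :: t) (fun x => x) false with _ | ⟨lo, u⟩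
      · exact absurd ((PySem.List.sorted_eq_nil_iff _ _ _).mp hs) (by simp)
      -- facts about the sorted list
      have hperm : (lo :: u).Perm (d :: t) := by
        have := PySem.List.sorted_perm (d :: t) (fun x => x) false
        rw [hs] at this; exact this
      have hpw : (lo :: u).Pairwise (· ≤ ·) := by
        have := PySem.List.sorted_pairwise (xs := d :: t) (key := fun x => x)
        rw [hs] at this; exact this
      set hi := (lo :: u).getLast (by simp) with hhi
      -- min agreement
      have hMmem : t.foldl min d ∈ d :: t := PySem.List.min?_mem hmin
      have hMle : ∀ y ∈ d :: t, t.foldl min d ≤ y := by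
        intro y hy; exact PySem.List.min?_isMin hmin y hy
      have hlomem : lo ∈ d :: t := hperm.mem_iff.mp (by simp)
      have hlole : ∀ y ∈ d :: t, lo ≤ y := by
        intro y hy
        exact PySem.List.key_head_sorted_le (d :: t) (fun x => x) hs y hy
      have heqmin : t.foldl min d = lo :=
        le_antisymm (hMle lo hlomem) (hlole _ hMmem)
      -- max agreement
      have hXmem : t.foldl max d ∈ d :: t := PySem.List.max?_mem hmax
      have hXge : ∀ y ∈ d :: t, y ≤ t.foldl max d := by
        intro y hy; exact PySem.List.max?_isMax hmax y hy
      have hhimem : hi ∈ d :: t := hperm.mem_iff.mp (List.getLast_mem _)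
      have hhige : ∀ x ∈ lo :: u, x ≤ hi := pv_le_getLast _ (by simp) hpw
      have heqmax : t.foldl max d = hi :=
        le_antisymm (hhige _ (hperm.mem_iff.mpr hXmem)) (hXge hi hhimem)
      rw [heqmin, heqmax]
      simp [hhi]
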